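-- pv_equiv track=rewrite | github.com/iZackk26/Programming-Test-s | dic_practice_1.py | add_and_sort
-- ===== SOURCE A (Python) =====
-- def add_and_sort(n,list):
--     count = 0
--     quantity = 0
--     for x in list:
--         if x == n and quantity == 0:
--             list.insert(count,n)
--             quantity += 1
--         count += 1
--     if n not in list:
--             list.append(n)
--     return list
-- ===== SOURCE B (Python) =====
-- def add_and_sort(n, list):
--     res = []
--     inserted = False
--     for x in list:
--         if not inserted and x == n:
--             res.append(n)
--             inserted = True
--         res.append(x)
--     if not inserted:
--         res.append(n)
--     list[:] = res
--     return list
-- ===== Notes on version B (the rewrite author's own statement) =====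
-- stated objective: simpler
-- what changed: B builds the result in one forward pass with an 'inserted' flag (copy rebuild + list[:] assignment) instead of A's mid-iteration in-place index insertion followed by a separate 'n not in list' membership scan.
import Mathlib
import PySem

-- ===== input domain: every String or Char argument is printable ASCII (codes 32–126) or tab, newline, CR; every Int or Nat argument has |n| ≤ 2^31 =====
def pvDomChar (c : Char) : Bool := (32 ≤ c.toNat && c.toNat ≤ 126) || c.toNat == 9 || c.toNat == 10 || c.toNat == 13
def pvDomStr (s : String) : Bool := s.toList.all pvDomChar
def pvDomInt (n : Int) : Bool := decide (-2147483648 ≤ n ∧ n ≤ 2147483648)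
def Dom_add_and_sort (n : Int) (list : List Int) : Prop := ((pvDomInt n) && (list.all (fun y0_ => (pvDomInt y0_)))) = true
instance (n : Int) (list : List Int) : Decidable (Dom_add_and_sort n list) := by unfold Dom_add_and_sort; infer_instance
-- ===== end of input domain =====

-- B rebuilds the list in one forward pass with an 'inserted' flag instead of A's mid-iteration
-- in-place insert plus separate membership scan (objective: simpler). Both Pythons mutate `list`
-- in place to the same contents; the theorems here are about the returned value.

-- ===== PORT A =====
-- Python's `for x in list` over a list mutated during iteration reads by live index; we model the
-- iterator position as `idx` (always equal to A's `count` at loop entry) and the live list as `cur`.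
def aGo (n : Int) (cur : List Int) (idx count quantity : Nat) : List Int :=
  if h : idx < cur.length then
    if cur[idx] = n ∧ quantity = 0 then
      aGo n (PySem.List.insert cur (count : Int) n) (idx + 1) (count + 1) (quantity + 1)
    else
      aGo n cur (idx + 1) (count + 1) quantity
  else cur
termination_by (cur.length + 1 - idx) * 2 + (if quantity = 0 then 1 else 0)
decreasing_by
  · rename_i hq
    have hl := PySem.List.length_insert cur (count : Int) n
    simp [hl, hq.2]
  · omega

def add_and_sort (n : Int) (list : List Int) : List Int :=
  let l2 := aGo n list 0 0 0
  if n ∈ l2 then l2 else l2 ++ [n]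

-- ===== PORT B =====
-- one loop step of Source B: state = (res, inserted)
def bStep (n : Int) (st : List Int × Bool) (x : Int) : List Int × Bool :=
  if !st.2 && x == n then (st.1 ++ [n, x], true) else (st.1 ++ [x], st.2)

def add_and_sort_alt (n : Int) (list : List Int) : List Int :=
  let s := list.foldl (bStep n) ([], false)
  if s.2 then s.1 else s.1 ++ [n]

-- ===== PRECONDITION & SPEC =====
def Spec_add_and_sort (n : Int) (list : List Int) (out : List Int) : Prop := out = add_and_sort_alt n list
instance (n : Int) (list : List Int) (out : List Int) : Decidable (Spec_add_and_sort n list out) := by unfold Spec_add_and_sort; infer_instance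

-- ===== CLAIM (what is proved, stated in full; the proofs are below) =====
def Claim_equal_add_and_sort : Prop := ∀ (n : Int) (list : List Int), Dom_add_and_sort n list → Spec_add_and_sort n list (add_and_sort n list)

-- ===== LEMMAS AND PROOFS =====

-- "insert n before the first occurrence of n, else change nothing": the common value of both loops
def insFirst (n : Int) : List Int → List Int
  | [] => []
  | x :: xs => if x = n then n :: x :: xs else x :: insFirst n xs

lemma aGo_one (n : Int) (cur : List Int) (idx count : Nat) : aGo n cur idx count 1 = cur := by
  rw [aGo]
  split
  · rw [if_neg (by simp)]
    exact aGo_one n cur (idx + 1) (count + 1)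
  · rfl
termination_by cur.length - idx

lemma aGo_zero (n : Int) (cur : List Int) (idx : Nat) (h : idx ≤ cur.length) :
    aGo n cur idx idx 0 = cur.take idx ++ insFirst n (cur.drop idx) := by
  rw [aGo]
  split
  case isTrue hlt =>
    by_cases hx : cur[idx] = n
    · rw [if_pos ⟨hx, rfl⟩, aGo_one,
        PySem.List.insert_natCast cur idx n (by omega),
        ← List.getElem_cons_drop hlt]
      simp [insFirst, hx]
    · rw [if_neg (by simp [hx]), aGo_zero n cur (idx + 1) (by omega),
        ← List.getElem_cons_drop hlt]
      simp only [insFirst, if_neg hx]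
      rw [List.take_add_one, List.getElem?_eq_getElem hlt]
      simp only [Option.toList_some, List.append_assoc, List.cons_append, List.nil_append]
  case isFalse hge =>
    have : idx = cur.length := by omega
    simp [this, insFirst]
termination_by cur.length - idx

lemma bfold_true (n : Int) (l acc : List Int) :
    l.foldl (bStep n) (acc, true) = (acc ++ l, true) := by
  induction l generalizing acc with
  | nil => simp
  | cons x xs ih => simp [bStep, ih]

lemma bfold_false (n : Int) (l acc : List Int) :
    l.foldl (bStep n) (acc, false) =
      if n ∈ l then (acc ++ insFirst n l, true) else (acc ++ l, false) := by
  induction l generalizing acc with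
  | nil => simp
  | cons x xs ih =>
    by_cases hx : x = n
    · simp [bStep, hx, bfold_true, insFirst]
    · rw [List.foldl_cons, show bStep n (acc, false) x = (acc ++ [x], false) by
          simp [bStep, hx], ih]
      by_cases hm : n ∈ xs
      · simp [hm, Ne.symm hx, insFirst, hx]
      · simp [hm, Ne.symm hx]

lemma mem_insFirst (n : Int) (l : List Int) (h : n ∈ l) : n ∈ insFirst n l := by
  induction l with
  | nil => simp at h
  | cons x xs ih =>
    by_cases hx : x = n
    · simp [insFirst, hx]
    · simp only [insFirst, if_neg hx, List.mem_cons]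
      right
      exact ih (by simpa [Ne.symm hx] using h)

lemma insFirst_of_not_mem (n : Int) (l : List Int) (h : n ∉ l) : insFirst n l = l := by
  induction l with
  | nil => rfl
  | cons x xs ih =>
    simp at h
    simp [insFirst, Ne.symm h.1, ih h.2]

-- ===== VERDICT (by name: the statement is the Claim_ definition above) =====
theorem add_and_sort_spec : Claim_equal_add_and_sort := by
  intro n l _
  unfold Spec_add_and_sort add_and_sort add_and_sort_alt
  rw [aGo_zero n l 0 (by omega), bfold_false]
  simp only [List.take_zero, List.drop_zero, List.nil_append]
  by_cases h : n ∈ l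
  · simp [h, mem_insFirst n l h]
  · simp [h, insFirst_of_not_mem n l h]
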